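-- pv_equiv track=rewrite | github.com/edenartlab/eve | eve/tools/abraham/abraham_covenant/validate_post.py | get_media_type
-- ===== SOURCE A (Python) =====
-- def get_media_type(url: str) -> str:
--     """Determine media type from URL extensions."""
--     url_lower = url.lower()
--
--     if any(url_lower.endswith(ext) for ext in ['.jpg', '.jpeg', '.png', '.gif', '.webp', '.bmp', '.svg']):
--         return 'image'
--     elif any(url_lower.endswith(ext) for ext in ['.mp4', '.webm', '.mov']):
--         return 'video'
--     elif any(url_lower.endswith(ext) for ext in ['.mp3', '.wav']):
--         return 'audio'
--     else:
--         return 'unknown'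
-- ===== SOURCE B (Python) =====
-- _MEDIA_TYPES = {
--     'jpg': 'image', 'jpeg': 'image', 'png': 'image', 'gif': 'image',
--     'webp': 'image', 'bmp': 'image', 'svg': 'image',
--     'mp4': 'video', 'webm': 'video', 'mov': 'video',
--     'mp3': 'audio', 'wav': 'audio',
-- }
--
-- def get_media_type(url: str) -> str:
--     """Determine media type from URL extensions."""
--     url_lower = url.lower()
--     if '.' not in url_lower:
--         return 'unknown'
--     ext = url_lower.rsplit('.', 1)[1]
--     return _MEDIA_TYPES.get(ext, 'unknown')
-- ===== Notes on version B (the rewrite author's own statement) =====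
-- stated objective: idiomatic
-- what changed: Replaces the three sequential any(endswith) scans over extension lists with a single extraction of the substring after the last dot followed by one dict lookup with a default for unrecognised extensions.
import Mathlib
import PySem

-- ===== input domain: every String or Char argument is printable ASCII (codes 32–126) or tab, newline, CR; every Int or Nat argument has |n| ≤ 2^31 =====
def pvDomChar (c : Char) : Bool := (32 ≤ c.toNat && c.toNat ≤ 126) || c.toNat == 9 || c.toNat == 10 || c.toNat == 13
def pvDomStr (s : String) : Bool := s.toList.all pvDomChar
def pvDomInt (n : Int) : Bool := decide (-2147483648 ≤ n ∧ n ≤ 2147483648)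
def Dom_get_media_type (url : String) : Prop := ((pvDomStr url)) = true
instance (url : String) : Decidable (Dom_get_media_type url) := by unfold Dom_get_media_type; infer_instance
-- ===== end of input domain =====

-- B replaces A's three any(endswith) scans by extracting the substring after the
-- last '.' and one table lookup (idiomatic; same asymptotic cost).

-- ===== PORT A =====
def get_media_type (url : String) : String :=
  let url_lower := PySem.Str.lower url
  if [".jpg", ".jpeg", ".png", ".gif", ".webp", ".bmp", ".svg"].any
      (fun ext => PySem.Str.endswith url_lower ext) then "image"
  else if [".mp4", ".webm", ".mov"].any (fun ext => PySem.Str.endswith url_lower ext) then "video"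
  else if [".mp3", ".wav"].any (fun ext => PySem.Str.endswith url_lower ext) then "audio"
  else "unknown"

-- ===== PORT B =====
-- the module-level dict _MEDIA_TYPES of Source B (keys as char lists: strings are proved on the list side)
def mediaTypes : PySem.Dict (List Char) String :=
  (((((((((((PySem.Dict.empty.insert "jpg".toList "image").insert "jpeg".toList "image").insert
    "png".toList "image").insert "gif".toList "image").insert "webp".toList "image").insert
    "bmp".toList "image").insert "svg".toList "image").insert "mp4".toList "video").insert
    "webm".toList "video").insert "mov".toList "video").insert "mp3".toList "audio").insert
    "wav".toList "audio"

-- url_lower.rsplit('.', 1)[1]: the chars after the LAST '.' — exact hand port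
-- (reverse, take up to the first '.', reverse back).
def extAfterLastDot (cs : List Char) : List Char :=
  (cs.reverse.takeWhile (fun c => c ≠ '.')).reverse

def get_media_type_alt (url : String) : String :=
  let cs := PySem.Chars.lower url.toList
  if PySem.Chars.isIn ['.'] cs then   -- '.' in url_lower ('in' on a 1-char needle)
    mediaTypes.getD (extAfterLastDot cs) "unknown"
  else "unknown"

-- ===== PRECONDITION & SPEC =====
def Spec_get_media_type (url : String) (out : String) : Prop := out = get_media_type_alt url
instance (url : String) (out : String) : Decidable (Spec_get_media_type url out) := by unfold Spec_get_media_type; infer_instance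

-- ===== CLAIM (what is proved, stated in full; the proofs are below) =====
def Claim_equal_get_media_type : Prop := ∀ (url : String), Dom_get_media_type url → Spec_get_media_type url (get_media_type url)

-- ===== LEMMAS AND PROOFS =====

-- a one-char needle of 'in' is list membership
theorem isIn_singleton (c : Char) (cs : List Char) :
    PySem.Chars.isIn [c] cs = true ↔ c ∈ cs := by
  rw [PySem.Chars.isIn_iff_infix]
  constructor
  · rintro ⟨l, r, h⟩; subst h; simp
  · intro h
    obtain ⟨l, r, h⟩ := List.append_of_mem h
    exact ⟨l, r, by simp [h]⟩

-- the first char surviving dropWhile (≠ '.') is a dot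
theorem dropWhile_ne_dot (l : List Char) (x : Char) (xs : List Char)
    (h : List.dropWhile (fun c => decide (c ≠ '.')) l = x :: xs) : x = '.' := by
  induction l with
  | nil => simp [List.dropWhile] at h
  | cons a t ih =>
    rw [List.dropWhile_cons] at h
    by_cases ha : a = '.'
    · rw [if_neg (by simp [ha])] at h
      injection h with h1 _
      rw [← h1]; exact ha
    · rw [if_pos (by simp [ha])] at h
      exact ih h

-- takeWhile (≠ '.') reads exactly the dot-free block before an explicit dot
theorem takeWhile_append_dot (e t : List Char) (he : '.' ∉ e) :
    List.takeWhile (fun c => decide (c ≠ '.')) (e ++ '.' :: t) = e := by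
  induction e with
  | nil => simp
  | cons a as ih =>
    have ha : a ≠ '.' := fun h => he (by simp [h])
    have has : '.' ∉ as := fun hm => he (List.mem_cons_of_mem _ hm)
    rw [List.cons_append, List.takeWhile_cons, if_pos (by simpa using ha), ih has]

-- a dotted suffix '.e' (e dot-free) sits at the end of cs iff cs has a dot and
-- the chars after the LAST dot are exactly e
theorem endswith_dot_iff (cs e : List Char) (he : '.' ∉ e) :
    ('.' :: e) <:+ cs ↔ ('.' ∈ cs ∧ extAfterLastDot cs = e) := by
  have hrev : ('.' :: e) <:+ cs ↔ (e.reverse ++ ['.']) <+: cs.reverse := by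
    rw [← List.reverse_prefix]; simp
  rw [hrev]
  have hmem : '.' ∈ cs ↔ '.' ∈ cs.reverse := by simp
  have hext : extAfterLastDot cs = e ↔ cs.reverse.takeWhile (fun c => c ≠ '.') = e.reverse := by
    unfold extAfterLastDot
    constructor
    · intro h; rw [← h, List.reverse_reverse]
    · intro h; rw [h, List.reverse_reverse]
  rw [hmem, hext]
  constructor
  · rintro ⟨t, ht⟩
    constructor
    · rw [← ht]; simp
    · rw [← ht]
      simp only [List.append_assoc, List.singleton_append]
      exact takeWhile_append_dot e.reverse t (by simpa using he)
  · rintro ⟨hd, htw⟩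
    have hsplit := (List.takeWhile_append_dropWhile (p := fun c => decide (c ≠ '.')) (l := cs.reverse))
    have hne : cs.reverse.dropWhile (fun c => decide (c ≠ '.')) ≠ [] := by
      intro hnil
      have := List.dropWhile_eq_nil_iff.mp hnil '.' hd
      simp at this
    obtain ⟨x, xs, hx⟩ := List.exists_cons_of_ne_nil hne
    have hxd : x = '.' := dropWhile_ne_dot cs.reverse x xs hx
    refine ⟨xs, ?_⟩
    rw [← hsplit, htw, hx, hxd]
    simp

theorem endswith_no_dot (cs e : List Char) (hd : '.' ∉ cs) :
    PySem.Chars.endswith cs ('.' :: e) = false := by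
  rw [Bool.eq_false_iff]
  intro h
  obtain ⟨t, ht⟩ := (PySem.Chars.endswith_iff cs ('.' :: e)).mp h
  exact hd (by rw [← ht]; simp)

-- ===== VERDICT (by name: the statement is the Claim_ definition above) =====
theorem get_media_type_spec : Claim_equal_get_media_type := by
  intro url _
  unfold Spec_get_media_type get_media_type get_media_type_alt
  simp only [List.any_cons, List.any_nil, PySem.Str.endswith_eq, PySem.Str.toList_lower]
  set cs := PySem.Chars.lower url.toList with hcs
  by_cases hd : '.' ∈ cs
  · rw [if_pos ((isIn_singleton '.' cs).mpr hd)]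
    have hw : ∀ d e : List Char, d = '.' :: e → '.' ∉ e →
        PySem.Chars.endswith cs d = decide (extAfterLastDot cs = e) := by
      intro d e hde he
      subst hde
      by_cases hx : extAfterLastDot cs = e
      · simp only [hx, decide_true]
        exact (PySem.Chars.endswith_iff cs ('.' :: e)).mpr ((endswith_dot_iff cs e he).mpr ⟨hd, hx⟩)
      · simp only [hx, decide_false]
        rw [Bool.eq_false_iff]
        intro hcon
        exact hx ((endswith_dot_iff cs e he).mp ((PySem.Chars.endswith_iff cs ('.' :: e)).mp hcon)).2
    have hjpg := hw ".jpg".toList "jpg".toList (by decide) (by decide)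
    have hjpeg := hw ".jpeg".toList "jpeg".toList (by decide) (by decide)
    have hpng := hw ".png".toList "png".toList (by decide) (by decide)
    have hgif := hw ".gif".toList "gif".toList (by decide) (by decide)
    have hwebp := hw ".webp".toList "webp".toList (by decide) (by decide)
    have hbmp := hw ".bmp".toList "bmp".toList (by decide) (by decide)
    have hsvg := hw ".svg".toList "svg".toList (by decide) (by decide)
    have hmp4 := hw ".mp4".toList "mp4".toList (by decide) (by decide)
    have hwebm := hw ".webm".toList "webm".toList (by decide) (by decide)
    have hmov := hw ".mov".toList "mov".toList (by decide) (by decide)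
    have hmp3 := hw ".mp3".toList "mp3".toList (by decide) (by decide)
    have hwav := hw ".wav".toList "wav".toList (by decide) (by decide)
    set x := extAfterLastDot cs with hx
    simp only [hjpg, hjpeg, hpng, hgif, hwebp, hbmp, hsvg, hmp4, hwebm, hmov, hmp3, hwav]
    by_cases h1 : x = ['j', 'p', 'g']; · rw [h1]; decide
    by_cases h2 : x = ['j', 'p', 'e', 'g']; · rw [h2]; decide
    by_cases h3 : x = ['p', 'n', 'g']; · rw [h3]; decide
    by_cases h4 : x = ['g', 'i', 'f']; · rw [h4]; decide
    by_cases h5 : x = ['w', 'e', 'b', 'p']; · rw [h5]; decide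
    by_cases h6 : x = ['b', 'm', 'p']; · rw [h6]; decide
    by_cases h7 : x = ['s', 'v', 'g']; · rw [h7]; decide
    by_cases h8 : x = ['m', 'p', '4']; · rw [h8]; decide
    by_cases h9 : x = ['w', 'e', 'b', 'm']; · rw [h9]; decide
    by_cases h10 : x = ['m', 'o', 'v']; · rw [h10]; decide
    by_cases h11 : x = ['m', 'p', '3']; · rw [h11]; decide
    by_cases h12 : x = ['w', 'a', 'v']; · rw [h12]; decide
    simp [mediaTypes, PySem.Dict.getD_insert, PySem.Dict.getD_empty,
      h1, h2, h3, h4, h5, h6, h7, h8, h9, h10, h11, h12]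
  · have hB : ¬ (PySem.Chars.isIn ['.'] cs = true) := fun hc => hd ((isIn_singleton '.' cs).mp hc)
    rw [if_neg hB]
    have hw : ∀ d e : List Char, d = '.' :: e → PySem.Chars.endswith cs d = false :=
      fun d e hde => hde ▸ endswith_no_dot cs e hd
    simp only [hw ".jpg".toList "jpg".toList (by decide), hw ".jpeg".toList "jpeg".toList (by decide),
      hw ".png".toList "png".toList (by decide), hw ".gif".toList "gif".toList (by decide),
      hw ".webp".toList "webp".toList (by decide), hw ".bmp".toList "bmp".toList (by decide),
      hw ".svg".toList "svg".toList (by decide), hw ".mp4".toList "mp4".toList (by decide),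
      hw ".webm".toList "webm".toList (by decide), hw ".mov".toList "mov".toList (by decide),
      hw ".mp3".toList "mp3".toList (by decide), hw ".wav".toList "wav".toList (by decide),
      Bool.or_false]
    rfl
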